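-- pv_equiv track=rewrite | github.com/sasasoren/BacTrak | probprediction.py | predict_overlap
-- ===== SOURCE A (Python) =====
-- def predict_overlap(base_func, tar_func, same_set=True):
--     '''
--     This function counts number of same segment chosen by targer function. if just two cell
--     have the same target function value it will return 1 more than that it will grow w.r.t
--     number of
--     :param base_func:
--     :param tar_func:
--     :param same_set:
--     :return: how many same segments have same target value
--     '''
--
--     counter_ = 0
--     for key, cells in base_func.items():
--         for c in cells:
--             flag = False
--             temp_dic = tar_func.copy()
--             if same_set:
--                 del temp_dic[key]
--             for cells2 in temp_dic.values():
--                 for c2 in cells2: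
--                     if c == c2:
--                         flag = True
--
--             if flag is True:
--                 counter_ += 1
--
--     return counter_
-- ===== SOURCE B (Python) =====
-- def predict_overlap(base_func, tar_func, same_set=True):
--     # Invert tar_func once: cell value -> set of tar_func keys whose segment contains it.
--     idx = {}
--     for k2, cells2 in tar_func.items():
--         for c2 in cells2:
--             idx.setdefault(c2, set()).add(k2)
--     counter_ = 0
--     for key, cells in base_func.items():
--         for c in cells:
--             ks = idx.get(c)
--             if ks is not None and (not same_set or any(k2 != key for k2 in ks)):
--                 counter_ += 1
--     return counter_
-- ===== Notes on version B (the rewrite author's own statement) =====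
-- stated objective: faster
-- what changed: B inverts tar_func once into a dict mapping each cell value to the set of tar_func keys containing it, replacing A's full rescan of tar_func (with a fresh dict copy) for every single base cell by one O(1)-ish index lookup per cell.
import Mathlib
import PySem

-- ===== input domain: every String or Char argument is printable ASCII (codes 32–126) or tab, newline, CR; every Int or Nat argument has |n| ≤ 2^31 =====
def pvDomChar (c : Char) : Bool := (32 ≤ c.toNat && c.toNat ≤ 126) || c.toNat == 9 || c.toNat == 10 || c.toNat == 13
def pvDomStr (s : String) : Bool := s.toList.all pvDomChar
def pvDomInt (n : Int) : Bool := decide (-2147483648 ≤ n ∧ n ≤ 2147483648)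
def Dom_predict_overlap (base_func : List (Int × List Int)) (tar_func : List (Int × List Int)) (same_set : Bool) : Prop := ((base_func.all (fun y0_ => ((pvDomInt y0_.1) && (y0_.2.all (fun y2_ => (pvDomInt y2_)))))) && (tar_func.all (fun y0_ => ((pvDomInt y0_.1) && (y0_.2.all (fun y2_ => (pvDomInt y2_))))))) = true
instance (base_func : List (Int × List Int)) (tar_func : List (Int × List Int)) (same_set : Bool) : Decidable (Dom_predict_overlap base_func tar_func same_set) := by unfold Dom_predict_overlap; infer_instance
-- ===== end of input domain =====

-- B replaces A's rescan of all of tar_func for every base cell by a single inverted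
-- index (cell value -> set of tar_func keys) built once: O(B+T) instead of O(B*T).

-- ===== PORT A =====
def predict_overlap (base_func : List (Int × List Int)) (tar_func : List (Int × List Int)) (same_set : Bool) : Int :=
  let baseD : PySem.Dict Int (List Int) := PySem.Dict.ofList base_func
  let tarD : PySem.Dict Int (List Int) := PySem.Dict.ofList tar_func
  baseD.items.foldl (fun counter kc =>
    kc.2.foldl (fun counter c =>
      -- temp_dic = tar_func.copy(); if same_set: del temp_dic[key]
      -- (del on a missing key raises KeyError in Python: excluded by Pre_)
      let temp := if same_set then tarD.erase kc.1 else tarD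
      let flag := temp.values.foldl (fun flag cells2 =>
        cells2.foldl (fun flag c2 => if c = c2 then true else flag) flag) false
      if flag = true then counter + 1 else counter) counter) 0

-- ===== PORT B =====
def predict_overlap_alt (base_func : List (Int × List Int)) (tar_func : List (Int × List Int)) (same_set : Bool) : Int :=
  let tarD : PySem.Dict Int (List Int) := PySem.Dict.ofList tar_func
  -- idx: cell value -> set of tar_func keys whose segment contains it
  let idx : PySem.Dict Int (PySem.Set Int) := tarD.items.foldl (fun d kc =>
    kc.2.foldl (fun d c2 => d.modify c2 [] (fun s => PySem.Set.add s kc.1)) d) PySem.Dict.empty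
  let baseD : PySem.Dict Int (List Int) := PySem.Dict.ofList base_func
  baseD.items.foldl (fun counter kc =>
    kc.2.foldl (fun counter c =>
      match idx.get? c with
      | none => counter
      | some ks => if !same_set || ks.any (fun k2 => k2 ≠ kc.1) then counter + 1 else counter) counter) 0

-- ===== PRECONDITION & SPEC =====
-- Pre_ excludes exactly the inputs on which A raises KeyError: same_set true and some
-- base_func dict entry with a nonempty cell list whose key is absent from tar_func.
def Pre_predict_overlap (base_func : List (Int × List Int)) (tar_func : List (Int × List Int)) (same_set : Bool) : Prop :=
  same_set = true → ∀ p ∈ (PySem.Dict.ofList base_func : PySem.Dict Int (List Int)).items, p.2 = [] ∨ p.1 ∈ tar_func.map Prod.fst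
instance (base_func : List (Int × List Int)) (tar_func : List (Int × List Int)) (same_set : Bool) : Decidable (Pre_predict_overlap base_func tar_func same_set) := by unfold Pre_predict_overlap; infer_instance
def pvWitness_predict_overlap : (List (Int × List Int)) × (List (Int × List Int)) × Bool := ([(1, [2])], [(1, [2]), (2, [2])], true)

def Spec_predict_overlap (base_func : List (Int × List Int)) (tar_func : List (Int × List Int)) (same_set : Bool) (out : Int) : Prop := out = predict_overlap_alt base_func tar_func same_set
instance (base_func : List (Int × List Int)) (tar_func : List (Int × List Int)) (same_set : Bool) (out : Int) : Decidable (Spec_predict_overlap base_func tar_func same_set out) := by unfold Spec_predict_overlap; infer_instance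

-- ===== CLAIM (what is proved, stated in full; the proofs are below) =====
def Claim_equal_predict_overlap : Prop := ∀ (base_func : List (Int × List Int)) (tar_func : List (Int × List Int)) (same_set : Bool), Dom_predict_overlap base_func tar_func same_set → Pre_predict_overlap base_func tar_func same_set → Spec_predict_overlap base_func tar_func same_set (predict_overlap base_func tar_func same_set)
-- ===== LEMMAS AND PROOFS =====

-- A's innermost flag loop is an 'any' over the cell list.
theorem flag_inner (c : Int) (l : List Int) (b : Bool) :
    l.foldl (fun flag c2 => if c = c2 then true else flag) b = (b || l.any (fun c2 => c = c2)) := by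
  induction l generalizing b with
  | nil => simp
  | cons x xs ih =>
    rw [List.foldl_cons, ih, List.any_cons]
    by_cases h : c = x <;> simp [h]

-- A's two flag loops together are an 'any' over the segments.
theorem flag_outer (c : Int) (vs : List (List Int)) (b : Bool) :
    vs.foldl (fun flag cells2 => cells2.foldl (fun flag c2 => if c = c2 then true else flag) flag) b
      = (b || vs.any (fun l => l.any (fun c2 => c = c2))) := by
  induction vs generalizing b with
  | nil => simp
  | cons l ls ih =>
    rw [List.foldl_cons, ih, flag_inner, List.any_cons]
    cases b <;> simp

-- Membership in the index after inserting one tar segment (inner build loop).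
theorem build_inner_mem (k0 k c : Int) (cells : List Int) (d : PySem.Dict Int (PySem.Set Int)) :
    k ∈ (cells.foldl (fun d c2 => d.modify c2 [] (fun s => PySem.Set.add s k0)) d).getD c []
      ↔ k ∈ d.getD c [] ∨ (k = k0 ∧ c ∈ cells) := by
  induction cells generalizing d with
  | nil => simp
  | cons x xs ih =>
    rw [List.foldl_cons, ih, PySem.Dict.getD_modify]
    by_cases h : c = x
    · rw [if_pos h]
      simp only [PySem.Set.mem_add, List.mem_cons, h]
      tauto
    · rw [if_neg h]
      simp only [List.mem_cons]
      tauto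

-- Presence in the index after inserting one tar segment (inner build loop).
theorem build_inner_contains (k0 c : Int) (cells : List Int) (d : PySem.Dict Int (PySem.Set Int)) :
    (cells.foldl (fun d c2 => d.modify c2 [] (fun s => PySem.Set.add s k0)) d).contains c
      = (d.contains c || cells.any (fun c2 => c = c2)) := by
  induction cells generalizing d with
  | nil => simp
  | cons x xs ih =>
    rw [List.foldl_cons, ih, PySem.Dict.contains_modify, List.any_cons]
    by_cases h : c = x <;> simp [h, Bool.or_comm, Bool.or_assoc]

-- Membership in the full index: k indexes c iff some tar pair with key k contains c.
theorem build_mem (k c : Int) (tl : List (Int × List Int)) (d : PySem.Dict Int (PySem.Set Int)) :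
    k ∈ (tl.foldl (fun d kc => kc.2.foldl (fun d c2 => d.modify c2 [] (fun s => PySem.Set.add s kc.1)) d) d).getD c []
      ↔ k ∈ d.getD c [] ∨ ∃ p ∈ tl, p.1 = k ∧ c ∈ p.2 := by
  induction tl generalizing d with
  | nil => simp
  | cons q qs ih =>
    rw [List.foldl_cons, ih, build_inner_mem]
    constructor
    · rintro ((h | ⟨h1, h2⟩) | ⟨p, hp, h3, h4⟩)
      · exact Or.inl h
      · exact Or.inr ⟨q, List.mem_cons_self, h1.symm, h2⟩
      · exact Or.inr ⟨p, List.mem_cons_of_mem _ hp, h3, h4⟩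
    · rintro (h | ⟨p, hp, h3, h4⟩)
      · exact Or.inl (Or.inl h)
      · rcases List.mem_cons.mp hp with rfl | hp'
        · exact Or.inl (Or.inr ⟨h3.symm, h4⟩)
        · exact Or.inr ⟨p, hp', h3, h4⟩

-- Presence in the full index: c is indexed iff some tar segment contains c.
theorem build_contains (c : Int) (tl : List (Int × List Int)) (d : PySem.Dict Int (PySem.Set Int)) :
    (tl.foldl (fun d kc => kc.2.foldl (fun d c2 => d.modify c2 [] (fun s => PySem.Set.add s kc.1)) d) d).contains c
      = (d.contains c || tl.any (fun p => p.2.any (fun c2 => c = c2))) := by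
  induction tl generalizing d with
  | nil => simp
  | cons q qs ih =>
    rw [List.foldl_cons, ih, build_inner_contains, List.any_cons, Bool.or_assoc]

-- Per-cell equality of A's scan condition and B's index lookup.
theorem cond_eq (tarD : PySem.Dict Int (List Int)) (same_set : Bool) (key c : Int) (counter : Int) :
    (if ((if same_set then tarD.erase key else tarD).values.any (fun l => l.any (fun c2 => c = c2)) : Bool)
       then counter + 1 else counter)
      = (match (tarD.items.foldl (fun d kc => kc.2.foldl (fun d c2 => d.modify c2 [] (fun s => PySem.Set.add s kc.1)) d) PySem.Dict.empty).get? c with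
         | none => counter
         | some ks => if !same_set || ks.any (fun k2 => k2 ≠ key) then counter + 1 else counter) := by
  have hcont := build_contains c tarD.items PySem.Dict.empty
  rw [PySem.Dict.contains_empty, Bool.false_or] at hcont
  cases hg : (tarD.items.foldl (fun d kc => kc.2.foldl (fun d c2 => d.modify c2 [] (fun s => PySem.Set.add s kc.1)) d) PySem.Dict.empty).get? c with
  | none =>
    have hc : tarD.items.any (fun p => p.2.any (fun c2 => c = c2)) = false := by
      rw [← hcont]
      exact (PySem.Dict.get?_eq_none_iff_contains _ _).mp hg
    have hflag : (if same_set then tarD.erase key else tarD).values.any (fun l => l.any (fun c2 => (c = c2 : Bool))) = false := by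
      rw [List.any_eq_false] at hc ⊢
      intro l hl
      have hlv : l ∈ tarD.values := by
        cases same_set with
        | false => simpa using hl
        | true =>
          rw [if_pos rfl] at hl
          rcases List.mem_map.mp hl with ⟨p, hp, rfl⟩
          exact List.mem_map.mpr ⟨p, (List.mem_filter.mp hp).1, rfl⟩
      rcases List.mem_map.mp hlv with ⟨p, hp, rfl⟩
      exact hc _ hp
    rw [hflag]
    simp
  | some ks =>
    have hks : (tarD.items.foldl (fun d kc => kc.2.foldl (fun d c2 => d.modify c2 [] (fun s => PySem.Set.add s kc.1)) d) PySem.Dict.empty).getD c [] = ks :=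
      PySem.Dict.getD_of_get?_eq_some _ _ hg
    have hmem : ∀ k : Int, k ∈ ks ↔ ∃ p ∈ tarD.items, p.1 = k ∧ c ∈ p.2 := by
      intro k
      rw [← hks, build_mem]
      simp [PySem.Dict.getD_empty]
    have hexists : ∃ p ∈ tarD.items, c ∈ p.2 := by
      have hco : (tarD.items.foldl (fun d kc => kc.2.foldl (fun d c2 => d.modify c2 [] (fun s => PySem.Set.add s kc.1)) d) PySem.Dict.empty).contains c = true := by
        rw [PySem.Dict.contains_eq_isSome_get?, hg]; rfl
      rw [hcont, List.any_eq_true] at hco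
      rcases hco with ⟨p, hp, h2⟩
      rcases List.any_eq_true.mp h2 with ⟨c2, hc2, he⟩
      have : c = c2 := by simpa using he
      exact ⟨p, hp, this ▸ hc2⟩
    cases same_set with
    | false =>
      rcases hexists with ⟨p, hp, hcp⟩
      have hA : tarD.values.any (fun l => l.any (fun c2 => (c = c2 : Bool))) = true :=
        List.any_eq_true.mpr ⟨p.2, List.mem_map.mpr ⟨p, hp, rfl⟩, List.any_eq_true.mpr ⟨c, hcp, by simp⟩⟩
      simp [hA]
    | true =>
      have hAB : (tarD.erase key).values.any (fun l => l.any (fun c2 => (c = c2 : Bool)))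
          = ks.any (fun k2 => (k2 ≠ key : Bool)) := by
        rw [Bool.eq_iff_iff, List.any_eq_true, List.any_eq_true]
        constructor
        · rintro ⟨l, hl, hany⟩
          rcases List.mem_map.mp hl with ⟨p, hp, rfl⟩
          rcases List.mem_filter.mp hp with ⟨hpi, hpk⟩
          rcases List.any_eq_true.mp hany with ⟨c2, hc2, he⟩
          have hcc : c = c2 := by simpa using he
          refine ⟨p.1, (hmem p.1).mpr ⟨p, hpi, rfl, hcc ▸ hc2⟩, ?_⟩
          simpa using hpk
        · rintro ⟨k2, hk2, hne⟩
          rcases (hmem k2).mp hk2 with ⟨p, hpi, hpk, hcp⟩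
          have hne' : p.1 ≠ key := by
            rw [hpk]; simpa using hne
          refine ⟨p.2, List.mem_map.mpr ⟨p, List.mem_filter.mpr ⟨hpi, by simpa using hne'⟩, rfl⟩, List.any_eq_true.mpr ⟨c, hcp, by simp⟩⟩
      simp [hAB]

-- ===== VERDICT (by name: the statement is the Claim_ definition above) =====
theorem predict_overlap_spec : Claim_equal_predict_overlap := by
  intro base_func tar_func same_set _ _
  unfold Spec_predict_overlap
  simp only [predict_overlap, predict_overlap_alt]
  congr 1
  funext counter kc
  congr 1
  funext cnt c
  rw [flag_outer, Bool.false_or]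
  exact cond_eq (PySem.Dict.ofList tar_func) same_set kc.1 c cnt
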